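-- pv_equiv track=rewrite | github.com/punkyfer/uva-programming-challenges | tema2/yahtzee.py | get_score_matrix
-- ===== SOURCE A (Python) =====
-- def get_score_matrix(game):
--   score_matrix = []
--   for tthrow in game:
--     dthrow = sorted(tthrow)
--     ones = 0
--     twos = 0
--     threes = 0
--     fours = 0
--     fives = 0
--     sixes = 0
--     chance = 0
--     three_of_a_kind = 0
--     four_of_a_kind = 0
--     five_of_a_kind = 0
--     short_straight = 0
--     long_straight = 0
--     full_house = 0
--     for dnum in dthrow:
--       if dnum == 1: ones += 1
--       elif dnum == 2: twos += 2
--       elif dnum == 3: threes += 3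
--       elif dnum == 4: fours += 4
--       elif dnum == 5: fives += 5
--       elif dnum == 6: sixes += 6
--       chance += dnum
--
--     dtset = list(set(dthrow))
--     for n in dtset:
--       ncount = dthrow.count(n)
--       if ncount == 3: three_of_a_kind = chance
--       if ncount == 4: four_of_a_kind = chance
--       if ncount == 5: five_of_a_kind = 50
--
--     if dthrow[1:]==[1,2,3,4] or dthrow[1:]==[2,3,4,5] or dthrow[1:]==[3,4,5,6]:
--       short_straight = 25
--
--     if dthrow[:-1]==[1,2,3,4] or dthrow[:-1]==[2,3,4,5] or dthrow[:-1]==[3,4,5,6]: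
--       short_straight = 25
--
--     if dthrow==[1,2,3,4,5] or dthrow==[2,3,4,5,6]:
--       long_straight = 35
--
--     if len(dtset) == 2:
--       if dthrow.count(dtset[0]) == 2 and dthrow.count(dtset[1])==3:
--         full_house = 40
--       if dthrow.count(dtset[1]) == 2 and dthrow.count(dtset[0])==3:
--         full_house = 40
--     score_matrix += [[ones, twos, threes, fours, fives, sixes, chance, three_of_a_kind, four_of_a_kind,
--       five_of_a_kind, short_straight, long_straight, full_house]]
--
--   return score_matrix
-- ===== SOURCE B (Python) =====
-- def get_score_matrix(game):
--     result = []
--     for throw in game: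
--         counter = {}
--         for x in throw:
--             counter[x] = counter.get(x, 0) + 1
--         counts = list(counter.values())
--         chance = sum(throw)
--         three_of_a_kind = chance if 3 in counts else 0
--         four_of_a_kind = chance if 4 in counts else 0
--         five_of_a_kind = 50 if 5 in counts else 0
--         full_house = 40 if sorted(counts) == [2, 3] else 0
--         short_straight = 25 if any(all(v in counter for v in run)
--                                    for run in ([1, 2, 3, 4], [2, 3, 4, 5], [3, 4, 5, 6])) else 0
--         long_straight = 35 if sorted(counter) in ([1, 2, 3, 4, 5], [2, 3, 4, 5, 6]) else 0
--         result.append([counter.get(1, 0), 2 * counter.get(2, 0), 3 * counter.get(3, 0),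
--                        4 * counter.get(4, 0), 5 * counter.get(5, 0), 6 * counter.get(6, 0),
--                        chance, three_of_a_kind, four_of_a_kind, five_of_a_kind,
--                        short_straight, long_straight, full_house])
--     return result
-- ===== Notes on version B (the rewrite author's own statement) =====
-- stated objective: idiomatic
-- what changed: B builds one frequency dict per throw and derives every category from it (counts, values-multiset full house, membership-based straights), replacing A's sort of each throw, the per-distinct-value .count rescans and the positional slice-equality straight tests.
-- intended difference: On throws that contain a 4-run {a,a+1,a+2,a+3} that is not a contiguous prefix/suffix of the sorted throw (e.g. [1,2,2,3,4]) or that cover exactly {1,2,3,4,5}/{2,3,4,5,6} with a duplicate, A scores the straight 0 because its rigid slice-equality test misses it, while B scores 25/35; the run is genuinely present, so B's is the intended Yahtzee score. — e.g. on get_score_matrix([[1, 2, 2, 3, 4]]): A returns [[1, 4, 3, 4, 0, 0, 12, 0, 0, 0, 0, 0, 0]], B returns [[1, 4, 3, 4, 0, 0, 12, 0, 0, 0, 25, 0, 0]]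
import Mathlib
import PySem

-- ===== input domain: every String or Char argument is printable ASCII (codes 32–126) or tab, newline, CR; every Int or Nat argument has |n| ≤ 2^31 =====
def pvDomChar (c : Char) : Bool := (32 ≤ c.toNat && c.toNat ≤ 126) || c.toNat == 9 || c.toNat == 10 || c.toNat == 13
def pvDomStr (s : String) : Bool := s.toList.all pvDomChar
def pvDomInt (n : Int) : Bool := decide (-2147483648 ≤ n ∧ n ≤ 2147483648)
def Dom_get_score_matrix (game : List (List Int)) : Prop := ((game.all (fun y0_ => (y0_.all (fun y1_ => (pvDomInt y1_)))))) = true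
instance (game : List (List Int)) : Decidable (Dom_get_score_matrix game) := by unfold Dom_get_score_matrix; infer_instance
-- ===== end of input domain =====

-- B replaces A's per-throw sort + per-distinct-value .count rescans + positional slice straight tests
-- by one frequency dict per throw from which every category is read off (objective: idiomatic).

-- ===== PORT A =====
-- the body of A's inner counting loop (the if/elif chain; its tests are mutually
-- exclusive on any dnum, so the elif chain is written componentwise), plus 'chance += dnum'
def pvCountStep (st : Int × Int × Int × Int × Int × Int × Int) (dnum : Int) :
    Int × Int × Int × Int × Int × Int × Int :=
  (if dnum = 1 then st.1 + 1 else st.1,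
   if dnum = 2 then st.2.1 + 2 else st.2.1,
   if dnum = 3 then st.2.2.1 + 3 else st.2.2.1,
   if dnum = 4 then st.2.2.2.1 + 4 else st.2.2.2.1,
   if dnum = 5 then st.2.2.2.2.1 + 5 else st.2.2.2.2.1,
   if dnum = 6 then st.2.2.2.2.2.1 + 6 else st.2.2.2.2.2.1,
   st.2.2.2.2.2.2 + dnum)

-- the body of A's 'for n in dtset' loop (three independent ifs on dthrow.count(n))
def pvKindStep (dthrow : List Int) (chance : Int) (k : Int × Int × Int) (n : Int) :
    Int × Int × Int :=
  (if PySem.List.count dthrow n = 3 then chance else k.1,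
   if PySem.List.count dthrow n = 4 then chance else k.2.1,
   if PySem.List.count dthrow n = 5 then (50 : Int) else k.2.2)

-- A's score row for one throw (the body of A's outer loop)
def pvRowA (tthrow : List Int) : List Int :=
  let dthrow := PySem.List.sorted tthrow (fun x => x) false
  let acc := dthrow.foldl pvCountStep (0, 0, 0, 0, 0, 0, 0)
  let chance := acc.2.2.2.2.2.2
  let dtset := PySem.Set.ofList dthrow
  let kinds := dtset.foldl (pvKindStep dthrow chance) (0, 0, 0)
  let short_straight : Int :=
    if PySem.List.slice dthrow (some 1) none = [1,2,3,4] ∨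
       PySem.List.slice dthrow (some 1) none = [2,3,4,5] ∨
       PySem.List.slice dthrow (some 1) none = [3,4,5,6] then 25 else 0
  let short_straight : Int :=
    if PySem.List.slice dthrow none (some (-1)) = [1,2,3,4] ∨
       PySem.List.slice dthrow none (some (-1)) = [2,3,4,5] ∨
       PySem.List.slice dthrow none (some (-1)) = [3,4,5,6] then 25 else short_straight
  let long_straight : Int :=
    if dthrow = [1,2,3,4,5] ∨ dthrow = [2,3,4,5,6] then 35 else 0
  -- 'if len(dtset) == 2: …dtset[0]…dtset[1]…' — indexing the two-element list, exact as a match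
  let full_house : Int :=
    match dtset with
    | [n0, n1] =>
        let fh : Int :=
          if PySem.List.count dthrow n0 = 2 ∧ PySem.List.count dthrow n1 = 3 then 40 else 0
        if PySem.List.count dthrow n1 = 2 ∧ PySem.List.count dthrow n0 = 3 then 40 else fh
    | _ => 0
  [acc.1, acc.2.1, acc.2.2.1, acc.2.2.2.1, acc.2.2.2.2.1, acc.2.2.2.2.2.1, chance,
   kinds.1, kinds.2.1, kinds.2.2, short_straight, long_straight, full_house]

def get_score_matrix (game : List (List Int)) : List (List Int) :=
  game.foldl (fun acc t => acc ++ [pvRowA t]) []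

-- ===== PORT B =====
-- B's score row for one throw: everything is read off the frequency dict
def pvRowB (throw : List Int) : List Int :=
  let counter := throw.foldl (fun (d : PySem.Dict Int Int) x => d.insert x (d.getD x 0 + 1))
    PySem.Dict.empty
  let counts := counter.values
  let chance := throw.sum
  let three_of_a_kind : Int := if (3 : Int) ∈ counts then chance else 0
  let four_of_a_kind : Int := if (4 : Int) ∈ counts then chance else 0
  let five_of_a_kind : Int := if (5 : Int) ∈ counts then 50 else 0
  let full_house : Int :=
    if PySem.List.sorted counts (fun x => x) false = [2, 3] then 40 else 0
  let short_straight : Int :=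
    if ([[1,2,3,4],[2,3,4,5],[3,4,5,6]] : List (List Int)).any
        (fun run => run.all (fun v => counter.contains v)) then 25 else 0
  let long_straight : Int :=
    if PySem.List.sorted counter.keys (fun x => x) false = [1,2,3,4,5] ∨
       PySem.List.sorted counter.keys (fun x => x) false = [2,3,4,5,6] then 35 else 0
  [counter.getD 1 0, 2 * counter.getD 2 0, 3 * counter.getD 3 0, 4 * counter.getD 4 0,
   5 * counter.getD 5 0, 6 * counter.getD 6 0, chance, three_of_a_kind, four_of_a_kind,
   five_of_a_kind, short_straight, long_straight, full_house]

def get_score_matrix_alt (game : List (List Int)) : List (List Int) :=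
  game.foldl (fun acc t => acc ++ [pvRowB t]) []

-- ===== PRECONDITION & SPEC =====
-- On throws that contain a short-straight 4-run {a..a+3} that is not a contiguous prefix/suffix
-- of the sorted throw (e.g. [1,2,2,3,4]), or whose values cover exactly {a..a+4} (a = 1,2) with a
-- duplicate, A scores the straight 0 (its rigid slice-equality test misses it) while B scores
-- 25/35; the run is genuinely present, so B's is the intended Yahtzee score.
abbrev pvRunP (t : List Int) (a : Int) : Prop := a ∈ t ∧ a+1 ∈ t ∧ a+2 ∈ t ∧ a+3 ∈ t
abbrev pvHasRunP (t : List Int) : Prop := pvRunP t 1 ∨ pvRunP t 2 ∨ pvRunP t 3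
-- 'five dice = a 4-run plus one extra die at or beyond the ends of the run' (multiset shape)
abbrev pvEndExtraP (t : List Int) : Prop :=
  ∃ a ∈ ([1, 2, 3] : List Int), ∃ m ∈ t,
    (m ≤ a ∨ a+3 ≤ m) ∧ t.Perm [m, a, a+1, a+2, a+3]
abbrev pvCoverP (t : List Int) (a : Int) : Prop :=
  pvRunP t a ∧ a+4 ∈ t ∧ ∀ x ∈ t, a ≤ x ∧ x ≤ a+4
abbrev pvSetLongP (t : List Int) : Prop := pvCoverP t 1 ∨ pvCoverP t 2
abbrev pvDiffP (t : List Int) : Prop :=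
  (pvHasRunP t ∧ ¬ pvEndExtraP t) ∨ (pvSetLongP t ∧ t.length ≠ 5)

def D_get_score_matrix (game : List (List Int)) : Prop :=
  ∃ t ∈ game, pvDiffP t

instance (game : List (List Int)) : Decidable (D_get_score_matrix game) := by
  unfold D_get_score_matrix
  have i1 : ∀ t : List Int, Decidable (pvHasRunP t) := fun t => by
    unfold pvHasRunP pvRunP; infer_instance
  have i2 : ∀ t : List Int, Decidable (pvEndExtraP t) := fun t => by
    unfold pvEndExtraP; infer_instance
  have i3 : ∀ t : List Int, Decidable (pvSetLongP t) := fun t => by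
    unfold pvSetLongP pvCoverP; infer_instance
  have inst : DecidablePred pvDiffP := fun t => by
    unfold pvDiffP
    haveI := i1 t; haveI := i2 t; haveI := i3 t
    infer_instance
  exact List.decidableBEx pvDiffP game

def Spec_get_score_matrix (game : List (List Int)) (out : List (List Int)) : Prop :=
  ¬ D_get_score_matrix game → out = get_score_matrix_alt game
instance (game : List (List Int)) (out : List (List Int)) : Decidable (Spec_get_score_matrix game out) := by
  unfold Spec_get_score_matrix; infer_instance

def pvDiffWitness_get_score_matrix : List (List Int) := [[1, 2, 2, 3, 4]]
def pvDiffWitnessOut_get_score_matrix : (List (List Int)) × (List (List Int)) :=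
  ([[1, 4, 3, 4, 0, 0, 12, 0, 0, 0, 0, 0, 0]], [[1, 4, 3, 4, 0, 0, 12, 0, 0, 0, 25, 0, 0]])

-- ===== CLAIM (what is proved, stated in full; the proofs are below) =====
def Claim_unchanged_get_score_matrix : Prop := ∀ (game : List (List Int)), Dom_get_score_matrix game → Spec_get_score_matrix game (get_score_matrix game)
def Claim_changed_get_score_matrix : Prop := Dom_get_score_matrix (pvDiffWitness_get_score_matrix) ∧ D_get_score_matrix (pvDiffWitness_get_score_matrix) ∧ get_score_matrix (pvDiffWitness_get_score_matrix) = pvDiffWitnessOut_get_score_matrix.1 ∧ get_score_matrix_alt (pvDiffWitness_get_score_matrix) = pvDiffWitnessOut_get_score_matrix.2 ∧ pvDiffWitnessOut_get_score_matrix.1 ≠ pvDiffWitnessOut_get_score_matrix.2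
def Claim_exact_get_score_matrix : Prop := ∀ (game : List (List Int)), Dom_get_score_matrix game → D_get_score_matrix game → get_score_matrix game ≠ get_score_matrix_alt game

-- ===== LEMMAS AND PROOFS =====


-- ---- generic fold helpers ----

theorem pvFoldProd {α β γ : Type} (f : α → γ → α) (g : β → γ → β) (l : List γ) (p : α × β) :
    l.foldl (fun s x => (f s.1 x, g s.2 x)) p = (l.foldl f p.1, l.foldl g p.2) := by
  induction l generalizing p with
  | nil => simp
  | cons x l ih => simp [ih]

theorem pvFoldIfConst (P : Int → Prop) [DecidablePred P] (c : Int) (s : List Int) (k : Int) :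
    s.foldl (fun a n => if P n then c else a) k = if ∃ n ∈ s, P n then c else k := by
  induction s generalizing k with
  | nil => simp
  | cons x s ih =>
    simp only [List.foldl_cons, ih, List.exists_mem_cons_iff]
    by_cases hx : P x <;> by_cases hs : ∃ n ∈ s, P n <;> simp [hx, hs]

theorem pvCountFold (l : List Int) (st : Int × Int × Int × Int × Int × Int × Int) :
    l.foldl pvCountStep st =
      (st.1 + (l.count 1 : Int), st.2.1 + 2 * (l.count 2 : Int), st.2.2.1 + 3 * (l.count 3 : Int),
       st.2.2.2.1 + 4 * (l.count 4 : Int), st.2.2.2.2.1 + 5 * (l.count 5 : Int),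
       st.2.2.2.2.2.1 + 6 * (l.count 6 : Int), st.2.2.2.2.2.2 + l.sum) := by
  induction l generalizing st with
  | nil => simp
  | cons x l ih =>
    simp only [List.foldl_cons, ih, pvCountStep, List.count_cons, List.sum_cons, Prod.ext_iff]
    refine ⟨?_, ?_, ?_, ?_, ?_, ?_, by push_cast; ring⟩ <;>
      · split_ifs <;> simp_all <;> omega

theorem pvKindFold (d : List Int) (ch : Int) (s : List Int) (k : Int × Int × Int) :
    s.foldl (pvKindStep d ch) k =
      ((if ∃ n ∈ s, PySem.List.count d n = 3 then ch else k.1),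
       (if ∃ n ∈ s, PySem.List.count d n = 4 then ch else k.2.1),
       (if ∃ n ∈ s, PySem.List.count d n = 5 then (50 : Int) else k.2.2)) := by
  have h1 : pvKindStep d ch = (fun (k : Int × Int × Int) n =>
      ((fun a n => if PySem.List.count d n = 3 then ch else a) k.1 n,
       (fun (p : Int × Int) n =>
          ((fun a n => if PySem.List.count d n = 4 then ch else a) p.1 n,
           (fun a n => if PySem.List.count d n = 5 then (50 : Int) else a) p.2 n)) k.2 n)) := rfl
  rw [h1]
  rw [pvFoldProd (fun a n => if PySem.List.count d n = 3 then ch else a)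
      (fun (p : Int × Int) n =>
        ((fun a n => if PySem.List.count d n = 4 then ch else a) p.1 n,
         (fun a n => if PySem.List.count d n = 5 then (50 : Int) else a) p.2 n)) s k]
  rw [pvFoldProd (fun a n => if PySem.List.count d n = 4 then ch else a)
      (fun a n => if PySem.List.count d n = 5 then (50 : Int) else a) s k.2]
  rw [pvFoldIfConst, pvFoldIfConst, pvFoldIfConst]

theorem pvValuesCounter (t : List Int) :
    (PySem.Dict.counter t).values = (PySem.Set.ofList t).map (fun k => (t.count k : Int)) := by
  simp [PySem.Dict.values, PySem.Dict.items_counter]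

-- a list permuted to a two-element list is one of its two arrangements
theorem pvPermPair {α : Type} {l : List α} {x y : α} (h : l.Perm [x, y]) :
    l = [x, y] ∨ l = [y, x] := by
  match l, h.length_eq, h with
  | [a, b], _, h =>
    have ha : a = x ∨ a = y := by
      have hm := (h.mem_iff (a := a)).1 (by simp)
      simpa using hm
    rcases ha with ha | ha
    · left
      have h2 := h
      rw [ha] at h2
      have hb : b = y := by simpa using List.perm_singleton.mp h2.cons_inv
      rw [ha, hb]
    · right
      have h2 := h.trans (List.Perm.swap y x [])
      rw [ha] at h2
      have hb : b = x := by simpa using List.perm_singleton.mp h2.cons_inv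
      rw [ha, hb]

-- ---- per-throw facts ----

-- the four members of a straight slice are members of the sorted throw
theorem pvSliceMem {d : List Int} {r : List Int} (h : d.tail = r ∨ d.dropLast = r) :
    ∀ v ∈ r, v ∈ d := by
  intro v hv
  rcases h with h | h
  · exact List.mem_of_mem_drop (i := 1) (by rw [List.drop_one, h]; exact hv)
  · exact List.dropLast_subset _ (by rw [h]; exact hv)

theorem pvIfIf (c1 c2 : Prop) [Decidable c1] [Decidable c2] (v e : Int) :
    (if c2 then v else if c1 then v else e) = if c1 ∨ c2 then v else e := by
  split_ifs <;> tauto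

theorem pvBshortIff (t : List Int) :
    (([[1,2,3,4],[2,3,4,5],[3,4,5,6]] : List (List Int)).any
        (fun run => run.all (fun v => (PySem.Dict.counter t).contains v)) = true) ↔
      pvHasRunP t := by
  simp [pvHasRunP, pvRunP, PySem.Dict.contains_counter, List.all_eq_true]

theorem pvSortedOfListEq (t : List Int) (r : List Int) (hr : List.Pairwise (· < ·) r) :
    (PySem.List.sorted (PySem.Set.ofList t) (fun x => x) false = r) ↔
      ((∀ v ∈ r, v ∈ t) ∧ ∀ x ∈ t, x ∈ r) := by
  constructor
  · intro h
    have hp : r.Perm (PySem.Set.ofList t) := by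
      have hq := PySem.List.sorted_perm (PySem.Set.ofList t) (fun x => x) false
      rw [h] at hq; exact hq
    constructor
    · intro v hv
      exact (PySem.Set.mem_ofList t v).1 (hp.subset hv)
    · intro x hx
      exact hp.symm.subset ((PySem.Set.mem_ofList t x).2 hx)
  · rintro ⟨h1, h2⟩
    have hnr : r.Nodup := hr.imp (fun h => ne_of_lt h)
    have hp : r.Perm (PySem.Set.ofList t) :=
      (List.perm_ext_iff_of_nodup hnr (PySem.Set.nodup_ofList t)).2
        (fun a => ⟨fun ha => (PySem.Set.mem_ofList t a).2 (h1 a ha),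
                   fun ha => h2 a ((PySem.Set.mem_ofList t a).1 ha)⟩)
    exact PySem.List.sorted_eq_of_perm_of_pairwise_lt _ r _ hp hr

theorem pvCover_of_memIff (t : List Int) (a : Int) (r : List Int)
    (hmem : ∀ x : Int, x ∈ t ↔ x ∈ r)
    (h0 : a ∈ r) (h1 : a+1 ∈ r) (h2 : a+2 ∈ r) (h3 : a+3 ∈ r) (h4 : a+4 ∈ r)
    (hall : ∀ x ∈ r, a ≤ x ∧ x ≤ a+4) : pvCoverP t a :=
  ⟨⟨(hmem _).2 h0, (hmem _).2 h1, (hmem _).2 h2, (hmem _).2 h3⟩, (hmem _).2 h4,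
   fun x hx => hall x ((hmem x).1 hx)⟩

theorem pvBlongIff (t : List Int) :
    ((PySem.List.sorted (PySem.Set.ofList t) (fun x => x) false = [1,2,3,4,5]) ∨
     (PySem.List.sorted (PySem.Set.ofList t) (fun x => x) false = [2,3,4,5,6])) ↔
      pvSetLongP t := by
  rw [pvSortedOfListEq t [1,2,3,4,5] (by decide), pvSortedOfListEq t [2,3,4,5,6] (by decide)]
  constructor
  · rintro (⟨hsub, hsup⟩ | ⟨hsub, hsup⟩)
    · refine Or.inl (pvCover_of_memIff t 1 [1,2,3,4,5] (fun x => ⟨fun hx => hsup x hx, fun hx => hsub x hx⟩)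
        (by decide) (by decide) (by decide) (by decide) (by decide) (by decide))
    · refine Or.inr (pvCover_of_memIff t 2 [2,3,4,5,6] (fun x => ⟨fun hx => hsup x hx, fun hx => hsub x hx⟩)
        (by decide) (by decide) (by decide) (by decide) (by decide) (by decide))
  · rintro (⟨⟨h1, h2, h3, h4⟩, h5, hb⟩ | ⟨⟨h1, h2, h3, h4⟩, h5, hb⟩)
    · refine Or.inl ⟨fun v hv => ?_, fun x hx => ?_⟩
      · simp only [List.mem_cons, List.not_mem_nil, or_false] at hv
        rcases hv with rfl | rfl | rfl | rfl | rfl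
        exacts [h1, by simpa using h2, by simpa using h3, by simpa using h4, by simpa using h5]
      · have := hb x hx
        simp only [List.mem_cons, List.not_mem_nil, or_false]
        omega
    · refine Or.inr ⟨fun v hv => ?_, fun x hx => ?_⟩
      · simp only [List.mem_cons, List.not_mem_nil, or_false] at hv
        rcases hv with rfl | rfl | rfl | rfl | rfl
        exacts [h1, by simpa using h2, by simpa using h3, by simpa using h4, by simpa using h5]
      · have := hb x hx
        simp only [List.mem_cons, List.not_mem_nil, or_false]
        omega

theorem pvRun_of_subset (t : List Int) (a : Int) (r : List Int) (h : ∀ v ∈ r, v ∈ t)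
    (ha : a ∈ r) (ha1 : a+1 ∈ r) (ha2 : a+2 ∈ r) (ha3 : a+3 ∈ r) : pvRunP t a :=
  ⟨h _ ha, h _ ha1, h _ ha2, h _ ha3⟩

theorem pvSortedPairEq (x y : Int) :
    (PySem.List.sorted [x, y] (fun v => v) false = ([2,3] : List Int)) ↔
      ((x = 2 ∧ y = 3) ∨ (x = 3 ∧ y = 2)) := by
  constructor
  · intro h
    have hp : ([x, y] : List Int).Perm [2, 3] := by
      have hq := PySem.List.sorted_perm ([x, y] : List Int) (fun v => v) false
      rw [h] at hq; exact hq.symm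
    rcases pvPermPair hp with h' | h' <;> · simp at h'; tauto
  · rintro (⟨rfl, rfl⟩ | ⟨rfl, rfl⟩) <;> decide

-- sorted-slice readings of A's straight tests (proof-side only)
abbrev pvSliceShortP (t : List Int) : Prop :=
  ((PySem.List.sorted t (fun x => x) false).tail = [1,2,3,4] ∨
   (PySem.List.sorted t (fun x => x) false).tail = [2,3,4,5] ∨
   (PySem.List.sorted t (fun x => x) false).tail = [3,4,5,6]) ∨
  ((PySem.List.sorted t (fun x => x) false).dropLast = [1,2,3,4] ∨
   (PySem.List.sorted t (fun x => x) false).dropLast = [2,3,4,5] ∨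
   (PySem.List.sorted t (fun x => x) false).dropLast = [3,4,5,6])
abbrev pvSliceLongP (t : List Int) : Prop :=
  PySem.List.sorted t (fun x => x) false = [1,2,3,4,5] ∨
  PySem.List.sorted t (fun x => x) false = [2,3,4,5,6]

theorem pvShortEquiv_tail (t : List Int) (a : Int) (ha : a ∈ ([1,2,3] : List Int))
    (h : (PySem.List.sorted t (fun x => x) false).tail = [a, a+1, a+2, a+3]) :
    pvEndExtraP t := by
  have hd := PySem.List.sorted_perm t (fun x => x) false
  have hpw := PySem.List.sorted_pairwise t (fun x => x)
  cases hs : PySem.List.sorted t (fun x => x) false with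
  | nil => rw [hs] at h; simp at h
  | cons m l =>
    rw [hs] at h hd hpw
    simp only [List.tail_cons] at h
    subst h
    have hle : m ≤ a := by
      simp [List.pairwise_cons] at hpw
      omega
    exact ⟨a, ha, m, hd.mem_iff.1 (by simp), Or.inl hle, hd.symm⟩

theorem pvShortEquiv_dropLast (t : List Int) (a : Int) (ha : a ∈ ([1,2,3] : List Int))
    (h : (PySem.List.sorted t (fun x => x) false).dropLast = [a, a+1, a+2, a+3]) :
    pvEndExtraP t := by
  have hd := PySem.List.sorted_perm t (fun x => x) false
  have hpw := PySem.List.sorted_pairwise t (fun x => x)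
  have hne : PySem.List.sorted t (fun x => x) false ≠ [] := by
    intro hnil; rw [hnil] at h; simp at h
  have hs := (List.dropLast_append_getLast hne).symm
  rw [h] at hs
  set m := (PySem.List.sorted t (fun x => x) false).getLast hne with hm
  rw [hs] at hd hpw
  have hge : a+3 ≤ m := by
    simp [List.pairwise_append, List.pairwise_cons] at hpw
    omega
  refine ⟨a, ha, m, hd.mem_iff.1 (by simp), Or.inr hge, ?_⟩
  exact hd.symm.trans (List.perm_append_singleton m [a, a+1, a+2, a+3])

-- A's slice test and the multiset shape pvEndExtraP agree
theorem pvShortEquiv (t : List Int) : pvSliceShortP t ↔ pvEndExtraP t := by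
  have hd := PySem.List.sorted_perm t (fun x => x) false
  have hpw := PySem.List.sorted_pairwise t (fun x => x)
  constructor
  · rintro ((h | h | h) | (h | h | h))
    · exact pvShortEquiv_tail t 1 (by decide) (by norm_num; exact h)
    · exact pvShortEquiv_tail t 2 (by decide) (by norm_num; exact h)
    · exact pvShortEquiv_tail t 3 (by decide) (by norm_num; exact h)
    · exact pvShortEquiv_dropLast t 1 (by decide) (by norm_num; exact h)
    · exact pvShortEquiv_dropLast t 2 (by decide) (by norm_num; exact h)
    · exact pvShortEquiv_dropLast t 3 (by decide) (by norm_num; exact h)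
  · rintro ⟨a, ha, m, hm, hcond, hperm⟩
    simp only [List.mem_cons, List.not_mem_nil, or_false] at ha
    rcases hcond with hle | hge
    · have hsort : PySem.List.sorted t (fun x => x) false = [m, a, a+1, a+2, a+3] :=
        PySem.List.sorted_id_eq_of_perm_of_pairwise _ _ hperm.symm
          (by simp [List.pairwise_cons]; omega)
      rcases ha with rfl | rfl | rfl
      · exact Or.inl (Or.inl (by rw [hsort]; norm_num))
      · exact Or.inl (Or.inr (Or.inl (by rw [hsort]; norm_num)))
      · exact Or.inl (Or.inr (Or.inr (by rw [hsort]; norm_num)))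
    · have hsort : PySem.List.sorted t (fun x => x) false = [a, a+1, a+2, a+3, m] :=
        PySem.List.sorted_id_eq_of_perm_of_pairwise _ _
          ((List.perm_append_singleton m [a, a+1, a+2, a+3]).trans hperm.symm)
          (by simp [List.pairwise_cons]; omega)
      rcases ha with rfl | rfl | rfl
      · exact Or.inr (Or.inl (by rw [hsort]; norm_num [List.dropLast]))
      · exact Or.inr (Or.inr (Or.inl (by rw [hsort]; norm_num [List.dropLast])))
      · exact Or.inr (Or.inr (Or.inr (by rw [hsort]; norm_num [List.dropLast])))

theorem pvPermOfCover (t : List Int) (r : List Int) (hnd : r.Nodup) (hsub : r ⊆ t)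
    (hlen : t.length = r.length) : r.Perm t :=
  (List.subperm_of_subset hnd hsub).perm_of_length_le (by omega)

-- a covering throw of exactly five dice is a permutation of the run, so A's test fires
theorem pvLong_of_len (t : List Int) (hs : pvSetLongP t) (hlen : t.length = 5) :
    pvSliceLongP t := by
  rcases hs with ⟨⟨h1, h2, h3, h4⟩, h5, -⟩ | ⟨⟨h1, h2, h3, h4⟩, h5, -⟩
  · refine Or.inl (PySem.List.sorted_eq_of_perm_of_pairwise_lt _ _ _ ?_ (by decide))
    refine pvPermOfCover t [1,2,3,4,5] (by decide) ?_ (by simpa using hlen)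
    intro v hv
    simp only [List.mem_cons, List.not_mem_nil, or_false] at hv
    rcases hv with rfl | rfl | rfl | rfl | rfl
    · exact h1
    · simpa using h2
    · simpa using h3
    · simpa using h4
    · simpa using h5
  · refine Or.inr (PySem.List.sorted_eq_of_perm_of_pairwise_lt _ _ _ ?_ (by decide))
    refine pvPermOfCover t [2,3,4,5,6] (by decide) ?_ (by simpa using hlen)
    intro v hv
    simp only [List.mem_cons, List.not_mem_nil, or_false] at hv
    rcases hv with rfl | rfl | rfl | rfl | rfl
    · exact h1
    · simpa using h2
    · simpa using h3
    · simpa using h4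
    · simpa using h5

theorem pvLong_len (t : List Int) (hs : pvSliceLongP t) : t.length = 5 := by
  rcases hs with h | h <;>
  · have hl := congrArg List.length h
    rw [PySem.List.length_sorted] at hl
    simpa using hl

theorem pvSliceLong_set (t : List Int) : pvSliceLongP t → pvSetLongP t := by
  have hd := PySem.List.sorted_perm t (fun x => x) false
  rintro (h | h)
  · refine Or.inl (pvCover_of_memIff t 1 [1,2,3,4,5] (fun x => ?_)
      (by decide) (by decide) (by decide) (by decide) (by decide) (by decide))
    rw [← h]
    exact hd.mem_iff.symm
  · refine Or.inr (pvCover_of_memIff t 2 [2,3,4,5,6] (fun x => ?_)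
      (by decide) (by decide) (by decide) (by decide) (by decide) (by decide))
    rw [← h]
    exact hd.mem_iff.symm

theorem pvSliceShort_run (t : List Int) : pvSliceShortP t → pvHasRunP t := by
  have hd := PySem.List.sorted_perm t (fun x => x) false
  have H : ∀ r : List Int,
      ((PySem.List.sorted t (fun x => x) false).tail = r ∨
       (PySem.List.sorted t (fun x => x) false).dropLast = r) → ∀ v ∈ r, v ∈ t :=
    fun r hr v hv => hd.subset (pvSliceMem hr v hv)
  rintro ((h | h | h) | (h | h | h))
  · exact Or.inl (pvRun_of_subset t 1 _ (H _ (Or.inl h)) (by decide) (by decide) (by decide) (by decide))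
  · exact Or.inr (Or.inl (pvRun_of_subset t 2 _ (H _ (Or.inl h)) (by decide) (by decide) (by decide) (by decide)))
  · exact Or.inr (Or.inr (pvRun_of_subset t 3 _ (H _ (Or.inl h)) (by decide) (by decide) (by decide) (by decide)))
  · exact Or.inl (pvRun_of_subset t 1 _ (H _ (Or.inr h)) (by decide) (by decide) (by decide) (by decide))
  · exact Or.inr (Or.inl (pvRun_of_subset t 2 _ (H _ (Or.inr h)) (by decide) (by decide) (by decide) (by decide)))
  · exact Or.inr (Or.inr (pvRun_of_subset t 3 _ (H _ (Or.inr h)) (by decide) (by decide) (by decide) (by decide)))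

theorem pvRow_eq (t : List Int) (h : ¬ pvDiffP t) : pvRowA t = pvRowB t := by
  have hd := PySem.List.sorted_perm t (fun x => x) false
  have hnd := h
  unfold pvDiffP at hnd
  push_neg at hnd
  obtain ⟨hshort_imp, hlong_imp⟩ := hnd
  have hshort_iff : pvSliceShortP t ↔ pvHasRunP t :=
    ⟨pvSliceShort_run t, fun hr => (pvShortEquiv t).2 (hshort_imp hr)⟩
  have hlong_iff : pvSliceLongP t ↔ pvSetLongP t :=
    ⟨pvSliceLong_set t, fun hs => pvLong_of_len t hs (hlong_imp hs)⟩
  have hkind : ∀ m : Nat,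
      ((m : Int) ∈ List.map (fun k => ((List.count k t : Int))) (PySem.Set.ofList t)) ↔
        (∃ n ∈ PySem.Set.ofList (PySem.List.sorted t (fun x => x) false), List.count n t = m) := by
    intro m
    simp [List.mem_map, PySem.Set.mem_ofList, hd.mem_iff]
  have hk3 := by simpa only [Nat.cast_ofNat] using hkind 3
  have hk4 := by simpa only [Nat.cast_ofNat] using hkind 4
  have hk5 := by simpa only [Nat.cast_ofNat] using hkind 5
  unfold pvRowA pvRowB
  rw [PySem.Dict.foldl_insert_getD_add_one_eq_counter]
  simp only [pvCountFold, pvKindFold, PySem.Dict.getD_counter, pvValuesCounter,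
             PySem.Dict.keys_counter, PySem.List.slice_from_one, PySem.List.slice_to_neg_one]
  simp only [PySem.List.count_eq, hd.count_eq, hd.sum_eq, zero_add]
  simp only [hk3, hk4, hk5, List.cons.injEq, true_and, and_true]
  refine ⟨?_, ?_, ?_⟩
  · -- short straight
    rw [pvIfIf]
    have hA : ((PySem.List.sorted t (fun x => x) false).tail = [1,2,3,4] ∨
        (PySem.List.sorted t (fun x => x) false).tail = [2,3,4,5] ∨
        (PySem.List.sorted t (fun x => x) false).tail = [3,4,5,6]) ∨
        ((PySem.List.sorted t (fun x => x) false).dropLast = [1,2,3,4] ∨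
        (PySem.List.sorted t (fun x => x) false).dropLast = [2,3,4,5] ∨
        (PySem.List.sorted t (fun x => x) false).dropLast = [3,4,5,6]) ↔ pvHasRunP t := hshort_iff
    rw [if_congr hA rfl rfl, if_congr (pvBshortIff t) rfl rfl]
  · -- long straight
    rw [if_congr (Iff.trans (show _ ↔ pvSliceLongP t from Iff.rfl) hlong_iff) rfl rfl,
        if_congr (pvBlongIff t) rfl rfl]
  · -- full house
    have hST : (PySem.Set.ofList (PySem.List.sorted t (fun x => x) false)).Perm
        (PySem.Set.ofList t) :=
      (List.perm_ext_iff_of_nodup (PySem.Set.nodup_ofList _) (PySem.Set.nodup_ofList _)).2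
        (fun a => by simp [PySem.Set.mem_ofList, hd.mem_iff])
    generalize hS : PySem.Set.ofList (PySem.List.sorted t (fun x => x) false) = S at hST ⊢
    have hlen := hST.length_eq
    rcases S with - | ⟨a, - | ⟨b, - | ⟨c, rest⟩⟩⟩
    · rw [if_neg]
      intro hcon
      have hl := congrArg List.length hcon
      rw [PySem.List.length_sorted, List.length_map, ← hlen] at hl
      simp at hl
      try omega
    · rw [if_neg]
      intro hcon
      have hl := congrArg List.length hcon
      rw [PySem.List.length_sorted, List.length_map, ← hlen] at hl
      simp at hl
      try omega
    · -- two distinct values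
      rcases pvPermPair hST.symm with hT | hT <;>
        · rw [hT]
          simp only [List.map_cons, List.map_nil, pvIfIf, pvSortedPairEq]
          refine if_congr ?_ rfl rfl
          omega
    · rw [if_neg]
      intro hcon
      have hl := congrArg List.length hcon
      rw [PySem.List.length_sorted, List.length_map, ← hlen] at hl
      simp at hl
      try omega

theorem pvRow_ne (t : List Int) (h : pvDiffP t) : pvRowA t ≠ pvRowB t := by
  have hd := PySem.List.sorted_perm t (fun x => x) false
  intro heq
  unfold pvRowA pvRowB at heq
  rw [PySem.Dict.foldl_insert_getD_add_one_eq_counter] at heq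
  simp only [pvCountFold, pvKindFold, PySem.Dict.getD_counter, pvValuesCounter,
             PySem.Dict.keys_counter, PySem.List.slice_from_one, PySem.List.slice_to_neg_one] at heq
  simp only [List.cons.injEq] at heq
  obtain ⟨-, -, -, -, -, -, -, -, -, -, h10, h11, -⟩ := heq
  rcases h with ⟨hrun, hnslice⟩ | ⟨hset, hnslicel⟩
  · rw [pvIfIf, if_neg (fun hs => hnslice ((pvShortEquiv t).1 hs)),
        if_pos ((pvBshortIff t).2 hrun)] at h10
    norm_num at h10
  · rw [if_neg (fun hs => hnslicel (pvLong_len t hs)),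
        if_pos ((pvBlongIff t).2 hset)] at h11
    norm_num at h11

-- ===== VERDICT (by name: the statement is the Claim_ definition above) =====
theorem get_score_matrix_spec : Claim_unchanged_get_score_matrix := by
  intro game _ hnd
  unfold get_score_matrix get_score_matrix_alt
  rw [PySem.List.foldl_append_singleton_eq_map, PySem.List.foldl_append_singleton_eq_map]
  simp only [List.nil_append]
  exact List.map_congr_left (fun t ht => pvRow_eq t (fun hdp => hnd ⟨t, ht, hdp⟩))

theorem get_score_matrix_changed : Claim_changed_get_score_matrix := by
  unfold Claim_changed_get_score_matrix; decide

theorem get_score_matrix_tight : Claim_exact_get_score_matrix := by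
  intro game _ hd heq
  obtain ⟨t, ht, hdiff⟩ := hd
  unfold get_score_matrix get_score_matrix_alt at heq
  rw [PySem.List.foldl_append_singleton_eq_map, PySem.List.foldl_append_singleton_eq_map] at heq
  simp only [List.nil_append, List.map_eq_map_iff] at heq
  exact pvRow_ne t hdiff (heq t ht)
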